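-- pv_equiv track=rewrite | github.com/ionlipca7-boop/-ecom-listing-agent-mvp | audit_ebay_feed.py | _duplicate_titles
-- ===== SOURCE A (Python) =====
-- from collections import Counter
--
-- def _normalized_text(value: str | None) -> str:
--     if not isinstance(value, str):
--         return ""
--     return value.strip()
--
-- def _duplicate_titles(rows: list[dict]) -> tuple[int, list[str]]:
--     title_counter: Counter[str] = Counter()
--     for row in rows:
--         normalized_title = _normalized_text(row.get("title"))
--         if normalized_title:
--             title_counter[normalized_title] += 1
--
--     duplicates = sorted([title for title, count in title_counter.items() if count > 1])
--     return len(duplicates), duplicates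
-- ===== SOURCE B (Python) =====
-- def _normalized_text(value):
--     if not isinstance(value, str):
--         return ""
--     return value.strip()
--
-- def _collect(ts):
--     # ts is sorted; return each value occurring at least twice, dropping its whole run
--     if not ts:
--         return []
--     head, rest = ts[0], ts[1:]
--     tail = _collect([t for t in rest if t != head])
--     return [head] + tail if head in rest else tail
--
-- def _duplicate_titles(rows):
--     titles = sorted(t for t in (_normalized_text(row.get("title")) for row in rows) if t)
--     dups = _collect(titles)
--     return len(dups), dups
-- ===== Notes on version B (the rewrite author's own statement) =====
-- stated objective: alternative
-- what changed: Replaces the Counter build plus count>1 filter plus final sort with a sort-first strategy: sort all normalized titles with multiplicity, then recursively scan the sorted list, emitting a title when it reappears and dropping its whole run, so the result comes out already sorted with no count map and no final sort.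
import Mathlib
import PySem

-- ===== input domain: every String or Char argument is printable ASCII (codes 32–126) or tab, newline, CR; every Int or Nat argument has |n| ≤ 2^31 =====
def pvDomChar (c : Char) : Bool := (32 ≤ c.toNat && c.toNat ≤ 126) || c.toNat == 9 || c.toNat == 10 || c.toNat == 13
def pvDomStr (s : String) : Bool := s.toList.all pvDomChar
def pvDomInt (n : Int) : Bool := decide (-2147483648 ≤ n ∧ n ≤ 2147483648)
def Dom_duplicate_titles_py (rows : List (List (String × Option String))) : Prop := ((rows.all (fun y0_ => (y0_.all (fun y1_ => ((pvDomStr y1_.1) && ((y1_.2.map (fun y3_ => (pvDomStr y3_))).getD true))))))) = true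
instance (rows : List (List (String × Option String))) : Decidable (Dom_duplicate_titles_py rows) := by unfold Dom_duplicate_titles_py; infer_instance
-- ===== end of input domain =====

-- B replaces A's Counter-then-filter-then-sort with a sort-first algorithm: sort all normalized
-- titles with multiplicity, then a recursive run-dropping scan of the sorted list emits each title
-- that reappears; no count map and no final sort. Objective: alternative.

-- shared helper: _normalized_text(row.get("title")) — "" unless the value is a string, else strip
def pvNormTitle (row : List (String × Option String)) : String :=
  match (PySem.Dict.mk row).get? "title" with
  | some (some s) => PySem.Str.strip s
  | _ => ""

-- ===== PORT A =====
def duplicate_titles_py (rows : List (List (String × Option String))) : Int × List String :=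
  let counter : PySem.Dict String Int :=
    rows.foldl (fun d row =>
      let t := pvNormTitle row
      if t ≠ "" then d.modify t 0 (· + 1) else d) PySem.Dict.empty
  let duplicates :=
    PySem.List.sorted ((counter.items.filter (fun p => 1 < p.2)).map (·.1)) id
  ((duplicates.length : Int), duplicates)

-- ===== PORT B =====
-- Source B's _collect: recursive run-dropping scan of the (sorted) title list
def pvCollect : List String → List String
  | [] => []
  | t :: rest =>
    let tail := pvCollect (rest.filter (fun x => x ≠ t))
    if rest.contains t then t :: tail else tail
termination_by ts => ts.length
decreasing_by
  simp only [List.length_unattach, List.length_cons]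
  exact Nat.lt_succ_of_le (le_trans (List.length_filter_le _ _) (by simp))

def duplicate_titles_py_alt (rows : List (List (String × Option String))) : Int × List String :=
  let titles := PySem.List.sorted ((rows.map pvNormTitle).filter (fun t => t ≠ "")) id
  let dups := pvCollect titles
  ((dups.length : Int), dups)

-- ===== PRECONDITION & SPEC =====
def Spec_duplicate_titles_py (rows : List (List (String × Option String))) (out : Int × List String) : Prop := out = duplicate_titles_py_alt rows
instance (rows : List (List (String × Option String))) (out : Int × List String) : Decidable (Spec_duplicate_titles_py rows out) := by unfold Spec_duplicate_titles_py; infer_instance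

-- ===== CLAIM (what is proved, stated in full; the proofs are below) =====
def Claim_equal_duplicate_titles_py : Prop := ∀ (rows : List (List (String × Option String))), Dom_duplicate_titles_py rows → Spec_duplicate_titles_py rows (duplicate_titles_py rows)

-- ===== LEMMAS AND PROOFS =====

-- the non-empty normalized titles, in row order
def pvTitles (rows : List (List (String × Option String))) : List String :=
  (rows.map pvNormTitle).filter (fun t => t ≠ "")

-- A's counter is the fold of a modify-step over pvTitles
lemma A_counter_eq (rows : List (List (String × Option String))) :
    rows.foldl (fun d row =>
      let t := pvNormTitle row
      if t ≠ "" then d.modify t 0 (· + 1) else d) (PySem.Dict.empty : PySem.Dict String Int)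
    = (pvTitles rows).foldl (fun d t => d.modify t 0 (· + 1)) PySem.Dict.empty := by
  simp [pvTitles, List.foldl_filter, List.foldl_map]

-- pvCollect collects exactly the values occurring at least twice (by strong induction on length)
lemma mem_pvCollect_aux (n : Nat) : ∀ (ts : List String), ts.length ≤ n → ∀ a : String,
    (a ∈ pvCollect ts ↔ 2 ≤ ts.count a) := by
  induction n with
  | zero =>
    intro ts hl a
    have : ts = [] := List.eq_nil_of_length_eq_zero (Nat.le_zero.mp hl)
    subst this; simp [pvCollect]
  | succ n ih =>
    intro ts hl a
    match ts with
    | [] => simp [pvCollect]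
    | t :: rest =>
      rw [pvCollect]
      simp only [ne_eq, decide_not]
      simp only [List.length_cons] at hl
      have hlf : (rest.filter (fun x => !decide (x = t))).length ≤ n :=
        le_trans (List.length_filter_le _ _) (Nat.le_of_succ_le_succ hl)
      have ihf := ih _ hlf
      by_cases ha : a = t
      · subst ha
        have hz : (rest.filter (fun x => !decide (x = a))).count a = 0 := by
          simp [List.count_eq_zero, List.mem_filter]
        have hnot : a ∉ pvCollect (rest.filter (fun x => !decide (x = a))) := by
          rw [ihf a]; omega
        by_cases hm : a ∈ rest
        · simp [List.contains_eq_mem, hm, List.count_cons_self]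
        · have h0 : rest.count a = 0 := List.count_eq_zero.mpr hm
          simp [List.contains_eq_mem, hm, hnot, List.count_cons_self, h0]
      · have hts : ¬ t = a := fun h => ha h.symm
        have hcount : (rest.filter (fun x => !decide (x = t))).count a = rest.count a := by
          rw [List.count_filter]
          simp [ha]
        have hc : (t :: rest).count a = rest.count a := by
          simp [hts]
        by_cases hm : t ∈ rest
        · simp [List.contains_eq_mem, hm, ihf a, hcount, hc, ha]
        · simp [List.contains_eq_mem, hm, ihf a, hcount, hc]

lemma mem_pvCollect (ts : List String) (a : String) :
    a ∈ pvCollect ts ↔ 2 ≤ ts.count a :=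
  mem_pvCollect_aux ts.length ts le_rfl a

-- on a sorted input, pvCollect's output is strictly increasing
lemma pairwise_pvCollect_aux (n : Nat) : ∀ (ts : List String), ts.length ≤ n →
    ts.Pairwise (· ≤ ·) → (pvCollect ts).Pairwise (· < ·) := by
  induction n with
  | zero =>
    intro ts hl _
    have : ts = [] := List.eq_nil_of_length_eq_zero (Nat.le_zero.mp hl)
    subst this; simp [pvCollect]
  | succ n ih =>
    intro ts hl h
    match ts with
    | [] => simp [pvCollect]
    | t :: rest =>
      rw [pvCollect]
      simp only [ne_eq, decide_not]
      simp only [List.length_cons] at hl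
      rw [List.pairwise_cons] at h
      have hrest : (rest.filter (fun x => !decide (x = t))).Pairwise (· ≤ ·) :=
        h.2.sublist List.filter_sublist
      have hlf : (rest.filter (fun x => !decide (x = t))).length ≤ n :=
        le_trans (List.length_filter_le _ _) (Nat.le_of_succ_le_succ hl)
      have htailpw := ih _ hlf hrest
      by_cases hm : t ∈ rest
      · simp only [List.contains_eq_mem, hm, decide_true, if_true]
        refine List.pairwise_cons.mpr ⟨?_, htailpw⟩
        intro b hb
        have hbmem : b ∈ rest.filter (fun x => !decide (x = t)) := by
          have := (mem_pvCollect _ b).mp hb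
          exact List.count_pos_iff.mp (by omega)
        rw [List.mem_filter] at hbmem
        have hle : t ≤ b := h.1 b hbmem.1
        have hne : b ≠ t := by simpa using hbmem.2
        exact lt_of_le_of_ne hle (Ne.symm hne)
      · simpa [List.contains_eq_mem, hm] using htailpw

lemma pairwise_pvCollect (ts : List String) (h : ts.Pairwise (· ≤ ·)) :
    (pvCollect ts).Pairwise (· < ·) :=
  pairwise_pvCollect_aux ts.length ts le_rfl h

-- ===== VERDICT (by name: the statement is the Claim_ definition above) =====
theorem duplicate_titles_py_spec : Claim_equal_duplicate_titles_py := by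
  intro rows _
  unfold Spec_duplicate_titles_py duplicate_titles_py duplicate_titles_py_alt
  rw [A_counter_eq]
  set titles := pvTitles rows with htitles
  have htB : ((rows.map pvNormTitle).filter (fun t => t ≠ "")) = titles := rfl
  rw [htB]
  -- A's counter facts
  have hkeys : ((titles.foldl (fun d t => d.modify t 0 (· + 1)) PySem.Dict.empty :
      PySem.Dict String Int)).keys = PySem.Set.ofList titles := by
    simpa [PySem.Set.ofList, PySem.Set.update] using
      PySem.Dict.keys_foldl_modify_key titles (id) 0
        (fun _ _ => (· + 1)) PySem.Dict.empty
  have hnkeys : ((titles.foldl (fun d t => d.modify t 0 (· + 1)) PySem.Dict.empty :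
      PySem.Dict String Int)).keys.Nodup := by
    rw [hkeys]; exact PySem.Set.nodup_ofList titles
  have hgetD : ∀ t, ((titles.foldl (fun d t => d.modify t 0 (· + 1)) PySem.Dict.empty :
      PySem.Dict String Int)).getD t 0 = (titles.count t : Int) := by
    intro t
    simpa using PySem.Dict.getD_foldl_modify_add_one titles PySem.Dict.empty t
  set d := (titles.foldl (fun d t => d.modify t 0 (· + 1)) PySem.Dict.empty :
      PySem.Dict String Int) with hdd
  -- A's pre-sort list = keys filtered by count > 1
  have hitems : d.items = d.keys.map (fun k => (k, d.getD k 0)) :=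
    PySem.Dict.items_eq_map_keys d hnkeys 0
  have hAlist : ((d.items.filter (fun p => 1 < p.2)).map (·.1))
      = d.keys.filter (fun k => decide (1 < d.getD k 0)) := by
    rw [hitems, List.filter_map, List.map_map]
    simp [Function.comp_def]
  -- B's sorted titles
  set s := PySem.List.sorted titles id with hs
  have hsperm : s.Perm titles := PySem.List.sorted_perm titles id false
  have hspw : s.Pairwise (· ≤ ·) := by
    simpa using PySem.List.sorted_pairwise titles (id : String → String)
  -- B's result: strictly increasing, members = count ≥ 2
  have hBpw : (pvCollect s).Pairwise (· < ·) := pairwise_pvCollect s hspw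
  have hBnd : (pvCollect s).Nodup := hBpw.imp ne_of_lt
  have hBmem : ∀ a, a ∈ pvCollect s ↔ 2 ≤ titles.count a := by
    intro a; rw [mem_pvCollect, hsperm.count_eq]
  -- same members as A's pre-sort list
  have hmem : ∀ a, a ∈ d.keys.filter (fun k => decide (1 < d.getD k 0)) ↔ a ∈ pvCollect s := by
    intro a
    rw [hBmem a]
    simp only [List.mem_filter, hkeys, PySem.Set.mem_ofList, hgetD, decide_eq_true_eq]
    constructor
    · rintro ⟨_, h⟩; omega
    · intro h
      refine ⟨List.count_pos_iff.mp (by omega), by omega⟩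
  have hnodupA : (d.keys.filter (fun k => decide (1 < d.getD k 0))).Nodup :=
    hnkeys.filter _
  have hperm : (pvCollect s).Perm (d.keys.filter (fun k => decide (1 < d.getD k 0))) :=
    (List.perm_ext_iff_of_nodup hBnd hnodupA).mpr (fun a => (hmem a).symm)
  have hsorted : PySem.List.sorted ((d.items.filter (fun p => 1 < p.2)).map (·.1)) id
      = pvCollect s := by
    rw [hAlist]
    exact PySem.List.sorted_eq_of_perm_of_pairwise_lt _ _ id hperm (by simpa using hBpw)
  dsimp only
  rw [hsorted]
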